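-- pv_equiv track=rewrite | github.com/NCHCSpeech/stargan_pic_generator | inference.py | input_parser
-- ===== SOURCE A (Python) =====
-- def input_parser(input_str):
--     words = input_str.split()
--     y = [[1, 0, 0],  # black hair
--          [0, 1, 0],  # blond hair
--          [0, 0, 1]]  # brown hair
--
--     result = [1,0,0,0,1]
--
--     for keys in words:
--         if keys == 'black':
--    	        result[:3] = y[0]
--         elif keys == 'blond':
--             result[:3] = y[1]
--         elif keys == 'brown':
--             result[:3] = y[2]
--         if keys in ['man','male']:
--             result[3] = 1
--         if keys in ['old']:
--             result[4] = 0
--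
--     return result
-- ===== SOURCE B (Python) =====
-- HAIR_COLORS = ('black', 'blond', 'brown')
--
-- def input_parser(input_str):
--     words = input_str.split()
--     last = next((w for w in reversed(words) if w in HAIR_COLORS), None)
--     hair = [int(c == last) for c in HAIR_COLORS] if last is not None else [1, 0, 0]
--     seen = set(words)
--     male = int(not seen.isdisjoint({'man', 'male'}))
--     young = int('old' not in seen)
--     return hair + [male, young]
-- ===== Notes on version B (the rewrite author's own statement) =====
-- stated objective: alternative
-- what changed: Replaces A's forward fold that mutates a 5-slot result in place with a reverse first-match search (with early exit) for the last hair keyword, a one-hot vector built by comparing the color tuple against that winner, and both flags computed from a set(words) built once.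
import Mathlib
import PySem

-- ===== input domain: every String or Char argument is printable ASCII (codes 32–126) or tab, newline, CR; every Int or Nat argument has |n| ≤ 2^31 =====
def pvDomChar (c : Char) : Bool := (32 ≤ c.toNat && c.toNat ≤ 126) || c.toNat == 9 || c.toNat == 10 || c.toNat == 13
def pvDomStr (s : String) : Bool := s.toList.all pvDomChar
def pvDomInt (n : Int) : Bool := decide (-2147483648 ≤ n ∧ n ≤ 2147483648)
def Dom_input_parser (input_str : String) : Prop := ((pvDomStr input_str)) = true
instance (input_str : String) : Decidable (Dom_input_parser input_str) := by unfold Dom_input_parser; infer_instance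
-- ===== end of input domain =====

-- B finds the last hair keyword by a reverse first-match search and computes both flags from a
-- set built once, instead of A's single forward loop mutating a 5-slot result in place.

-- ===== PORT A =====
-- loop body of A: slice-assigns result[:3], then result[3], then result[4]
def pvStepA (result : List Int) (keys : String) : List Int :=
  let y : List (List Int) := [[1,0,0],[0,1,0],[0,0,1]]
  let result :=
    if keys = "black" then (y.getD 0 []) ++ result.drop 3
    else if keys = "blond" then (y.getD 1 []) ++ result.drop 3
    else if keys = "brown" then (y.getD 2 []) ++ result.drop 3
    else result
  let result := if keys = "man" ∨ keys = "male" then result.set 3 1 else result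
  if keys = "old" then result.set 4 0 else result

def input_parser (input_str : String) : List Int :=
  let words := PySem.Str.split₀ input_str
  let result : List Int := [1,0,0,0,1]
  words.foldl pvStepA result

-- ===== PORT B =====
def pvHairColors : List String := ["black", "blond", "brown"]

def input_parser_alt (input_str : String) : List Int :=
  let words := PySem.Str.split₀ input_str
  -- next((w for w in reversed(words) if w in HAIR_COLORS), None)
  let last : Option String := words.reverse.find? (fun w => w ∈ pvHairColors)
  let hair : List Int :=
    match last with
    | some l => pvHairColors.map (fun c => if c == l then 1 else 0)
    | none => [1, 0, 0]
  let seen : PySem.Set String := PySem.Set.ofList words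
  let male : Int := if PySem.Set.isdisjoint seen ["man", "male"] then 0 else 1
  let young : Int := if PySem.Set.contains seen "old" then 0 else 1
  hair ++ [male, young]

-- ===== PRECONDITION & SPEC =====
def Spec_input_parser (input_str : String) (out : List Int) : Prop := out = input_parser_alt input_str
instance (input_str : String) (out : List Int) : Decidable (Spec_input_parser input_str out) := by unfold Spec_input_parser; infer_instance

-- ===== CLAIM (what is proved, stated in full; the proofs are below) =====
def Claim_equal_input_parser : Prop := ∀ (input_str : String), Dom_input_parser input_str → Spec_input_parser input_str (input_parser input_str)

-- ===== LEMMAS AND PROOFS =====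

-- hair triple of B as a function of the word list
def pvHairOf (ws : List String) (dflt : List Int) : List Int :=
  match ws.reverse.find? (fun w => w ∈ pvHairColors) with
  | some l => pvHairColors.map (fun c => if c == l then 1 else 0)
  | none => dflt

theorem pvHairOf_cons (w : String) (ws : List String) (dflt : List Int) :
    pvHairOf (w :: ws) dflt =
      pvHairOf ws (if w ∈ pvHairColors then pvHairColors.map (fun c => if c == w then 1 else 0) else dflt) := by
  unfold pvHairOf
  simp only [List.reverse_cons, List.find?_append]
  cases h : ws.reverse.find? (fun w => w ∈ pvHairColors) <;>
    simp [List.find?] <;> split_ifs <;> simp_all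

theorem input_parser_foldl (ws : List String) :
    ∀ (a b c m o : Int),
      ws.foldl pvStepA [a,b,c,m,o] =
        pvHairOf ws [a,b,c] ++
          [(if ws.any (fun w => w == "man" || w == "male") then 1 else m),
           (if "old" ∈ ws then 0 else o)] := by
  induction ws with
  | nil => intro a b c m o; simp [pvHairOf]
  | cons w ws ih =>
    intro a b c m o
    simp only [List.foldl_cons, List.any_cons, List.mem_cons, pvHairOf_cons]
    by_cases hb : w = "black" <;> by_cases hl : w = "blond" <;> by_cases hr : w = "brown" <;>
      by_cases hm : w = "man" ∨ w = "male" <;> by_cases ho : w = "old" <;>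
      simp_all [pvStepA, pvHairColors, List.set] <;>
      split_ifs <;> simp_all

-- ===== VERDICT (by name: the statement is the Claim_ definition above) =====
theorem input_parser_spec : Claim_equal_input_parser := by
  intro input_str _
  unfold Spec_input_parser input_parser input_parser_alt
  rw [input_parser_foldl (PySem.Str.split₀ input_str) 1 0 0 0 1]
  have hy : (if PySem.Set.contains (PySem.Set.ofList (PySem.Str.split₀ input_str)) "old" then (0:Int) else 1)
      = (if "old" ∈ PySem.Str.split₀ input_str then (0:Int) else 1) := by
    simp [PySem.Set.contains, PySem.Set.mem_ofList]
  have hm : (if PySem.Set.isdisjoint (PySem.Set.ofList (PySem.Str.split₀ input_str)) ["man", "male"] then (0:Int) else 1)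
      = (if (PySem.Str.split₀ input_str).any (fun w => w == "man" || w == "male") then (1:Int) else 0) := by
    simp only [PySem.Set.isdisjoint, PySem.Set.contains, PySem.Set.mem_ofList,
      Bool.not_eq_true', List.any_eq_false, List.any_eq_true, List.mem_cons,
      List.not_mem_nil, or_false, beq_iff_eq, Bool.or_eq_true, decide_eq_true_eq,
      Bool.not_eq_true, List.any_eq_false]
    split_ifs with h1 h2 h3 <;> try rfl
    · obtain ⟨x, hx, ho⟩ := h2; have := h1 x hx
      rcases ho with rfl | rfl <;> simp_all
    · exfalso; apply h3; push Not at h1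
      obtain ⟨x, hx, ho⟩ := h1
      exact ⟨x, hx, by by_cases hmn : x = "man" <;> simp_all⟩
  simp only [pvHairOf, hy, hm]
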